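-- pv_equiv track=rewrite | github.com/admunk/ece143project | spotify_search.py | label_list
-- ===== SOURCE A (Python) =====
-- def label_list(data):
--     return_list = []
--     index = 0
--     for k,v in data.items():
--         if index > len(list(data.keys())) -  6:
--            return_list.append(k)
--         else:
--            return_list.append('')
--         index += 1
--     return return_list
-- ===== SOURCE B (Python) =====
-- def label_list(data):
--     keys = list(data.keys())
--     blanks = max(0, len(keys) - 5)
--     return [''] * blanks + keys[blanks:]
-- ===== Notes on version B (the rewrite author's own statement) =====
-- stated objective: faster
-- what changed: Replaces the index-counting loop with a per-element branch (which rebuilds list(data.keys()) to take its length on every iteration) by computing the split point max(0, n-5) once and concatenating a block of blanks with the trailing keys slice.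
import Mathlib
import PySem

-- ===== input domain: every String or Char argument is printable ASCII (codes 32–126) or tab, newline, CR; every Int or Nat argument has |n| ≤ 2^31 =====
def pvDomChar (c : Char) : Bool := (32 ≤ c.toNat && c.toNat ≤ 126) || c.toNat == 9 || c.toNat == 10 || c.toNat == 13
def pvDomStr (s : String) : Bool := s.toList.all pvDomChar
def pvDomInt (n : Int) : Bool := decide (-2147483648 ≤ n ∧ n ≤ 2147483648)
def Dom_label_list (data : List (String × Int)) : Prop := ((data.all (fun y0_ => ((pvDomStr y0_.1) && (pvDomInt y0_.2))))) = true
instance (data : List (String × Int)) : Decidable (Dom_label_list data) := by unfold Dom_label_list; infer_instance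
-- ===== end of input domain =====

-- B computes the split point max(0, n-5) once and concatenates blanks with the trailing keys,
-- instead of A's indexed loop with a per-element branch (objective: simpler).


-- ===== PORT A =====
-- A: loop over items with a running index; append k when index > len(keys) - 6, else ''.
def label_list (data : List (String × Int)) : List String :=
  (data.foldl
    (fun (st : List String × Int) kv =>
      (if st.2 > (data.length : Int) - 6 then st.1 ++ [kv.1] else st.1 ++ [""], st.2 + 1))
    ([], 0)).1

-- ===== PORT B =====
-- B: keys = list of keys; blanks = max(0, n-5); [''] * blanks ++ keys[blanks:].
def label_list_alt (data : List (String × Int)) : List String :=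
  let keys := data.map Prod.fst
  let blanks : Int := max 0 ((keys.length : Int) - 5)
  List.replicate blanks.toNat "" ++ PySem.List.slice keys (some blanks) none

-- ===== PRECONDITION & SPEC =====
def Spec_label_list (data : List (String × Int)) (out : List String) : Prop := out = label_list_alt data
instance (data : List (String × Int)) (out : List String) : Decidable (Spec_label_list data out) := by unfold Spec_label_list; infer_instance

-- ===== CLAIM (what is proved, stated in full; the proofs are below) =====
def Claim_equal_label_list : Prop := ∀ (data : List (String × Int)), Dom_label_list data → Spec_label_list data (label_list data)

-- ===== LEMMAS AND PROOFS =====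

-- A's loop body, as a direct recursion on the remaining items with the running index.
def pvGoA (N : Int) : Int → List (String × Int) → List String
  | _, [] => []
  | i, kv :: rest => (if i > N - 6 then kv.1 else "") :: pvGoA N (i + 1) rest

theorem pvFoldA (N : Int) (l : List (String × Int)) : ∀ (acc : List String) (i : Int),
    (l.foldl (fun (st : List String × Int) kv =>
        (if st.2 > N - 6 then st.1 ++ [kv.1] else st.1 ++ [""], st.2 + 1)) (acc, i)).1
      = acc ++ pvGoA N i l := by
  induction l with
  | nil => intro acc i; simp [pvGoA]
  | cons kv t ih =>
      intro acc i
      simp only [List.foldl_cons, pvGoA]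
      by_cases h : i > N - 6 <;> simp [h, ih] 

theorem pvGoA_closed (N : Int) (l : List (String × Int)) : ∀ (i : Int),
    pvGoA N i l
      = List.replicate (min l.length (N - 5 - i).toNat) ""
        ++ (l.map Prod.fst).drop (min l.length (N - 5 - i).toNat) := by
  induction l with
  | nil => intro i; simp [pvGoA]
  | cons kv t ih =>
      intro i
      by_cases h : i > N - 6
      · have h0 : (N - 5 - i).toNat = 0 := by omega
        have h1 : (N - 5 - (i + 1)).toNat = 0 := by omega
        simp [pvGoA, h, ih, h0, h1]
      · have h0 : (N - 5 - i).toNat = (N - 5 - (i + 1)).toNat + 1 := by omega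
        have h1 : min (t.length + 1) ((N - 5 - (i + 1)).toNat + 1)
            = min t.length (N - 5 - (i + 1)).toNat + 1 := by omega
        simp only [pvGoA, if_neg h, ih, List.length_cons, h0, h1]
        simp [List.replicate_succ]

-- ===== VERDICT (by name: the statement is the Claim_ definition above) =====
theorem label_list_spec : Claim_equal_label_list := by
  intro data _
  unfold Spec_label_list label_list label_list_alt
  rw [pvFoldA (data.length : Int) data [] 0, pvGoA_closed]
  have hmax : (max 0 ((data.length : Int) - 5)) = (((data.length - 5 : Nat) : Int)) := by omega
  have hmin : min data.length ((data.length : Int) - 5 - 0).toNat = data.length - 5 := by omega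
  simp only [List.nil_append, List.length_map, hmax, hmin,
    PySem.List.slice_from_natCast, Int.toNat_natCast]
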